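-- pv_equiv track=rewrite | github.com/alekz/advent-python | advent/year2024/day12/day12.py | get_sides_count
-- ===== SOURCE A (Python) =====
-- def get_sides_count(borders: dict[int, set[int]]) -> int:
--     count = 0
--     for border in borders.values():
--         prev_piece = None
--         for piece in sorted(border):
--             if prev_piece is None or piece != prev_piece + 1:
--                 count += 1
--             prev_piece = piece
--     return count
-- ===== SOURCE B (Python) =====
-- def get_sides_count(borders: dict[int, set[int]]) -> int:
--     count = 0
--     for border in borders.values():
--         count += sum(1 for x in border if x - 1 not in border)
--     return count
-- ===== Notes on version B (the rewrite author's own statement) =====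
-- stated objective: idiomatic
-- what changed: Instead of sorting each border set and scanning consecutive pairs with a prev pointer, B counts run-starts directly: an element x starts a run iff x-1 is not in the set, so it sums independent membership checks and removes the sort entirely.
import Mathlib
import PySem

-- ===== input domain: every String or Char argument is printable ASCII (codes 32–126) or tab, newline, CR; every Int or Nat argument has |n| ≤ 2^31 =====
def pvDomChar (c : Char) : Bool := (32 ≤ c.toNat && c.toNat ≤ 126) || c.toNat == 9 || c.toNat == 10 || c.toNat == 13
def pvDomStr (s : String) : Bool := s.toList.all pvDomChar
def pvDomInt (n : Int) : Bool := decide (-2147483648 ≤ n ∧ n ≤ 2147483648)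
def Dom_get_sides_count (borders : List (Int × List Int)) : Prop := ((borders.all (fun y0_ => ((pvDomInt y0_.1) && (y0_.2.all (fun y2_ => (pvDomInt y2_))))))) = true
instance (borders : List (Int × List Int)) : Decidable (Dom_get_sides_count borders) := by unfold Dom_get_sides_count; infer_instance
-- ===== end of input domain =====

-- B replaces A's sort-and-scan over each border set by independent membership checks
-- (an element x starts a run iff x-1 is not in the set); idiomatic, no sorting.

-- ===== PORT A =====
-- inner loop body of A: state (count, prev_piece)
def pvStep (st : Int × Option Int) (piece : Int) : Int × Option Int :=
  ((match st.2 with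
    | none => st.1 + 1
    | some q => if piece ≠ q + 1 then st.1 + 1 else st.1), some piece)

def get_sides_count (borders : List (Int × List Int)) : Int :=
  borders.foldl
    (fun count kv =>
      ((PySem.List.sorted kv.2 (fun x => x) false).foldl pvStep (count, none)).1)
    0

-- ===== PORT B =====
def get_sides_count_alt (borders : List (Int × List Int)) : Int :=
  borders.foldl
    (fun count kv =>
      count + ((kv.2.countP (fun x => !decide ((x - 1) ∈ kv.2))) : Int))
    0

-- ===== PRECONDITION & SPEC =====
-- The value lists encode Python sets, which hold distinct elements; Pre_ only states that.
def Pre_get_sides_count (borders : List (Int × List Int)) : Prop :=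
  ∀ kv ∈ borders, kv.2.Nodup
instance (borders : List (Int × List Int)) : Decidable (Pre_get_sides_count borders) := by unfold Pre_get_sides_count; infer_instance
def pvWitness_get_sides_count : (List (Int × List Int)) := [(0, [3, 1, 2]), (5, [])]

def Spec_get_sides_count (borders : List (Int × List Int)) (out : Int) : Prop := out = get_sides_count_alt borders
instance (borders : List (Int × List Int)) (out : Int) : Decidable (Spec_get_sides_count borders out) := by unfold Spec_get_sides_count; infer_instance

-- ===== CLAIM (what is proved, stated in full; the proofs are below) =====
def Claim_equal_get_sides_count : Prop := ∀ (borders : List (Int × List Int)), Dom_get_sides_count borders → Pre_get_sides_count borders → Spec_get_sides_count borders (get_sides_count borders)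

-- ===== LEMMAS AND PROOFS =====

lemma pv_scan_some (l : List Int) : ∀ (p c : Int),
    (p :: l).Pairwise (· < ·) →
    (l.foldl pvStep (c, some p)).1
      = c + ((l.countP (fun x => !decide ((x - 1) ∈ p :: l))) : Int) := by
  induction l with
  | nil => intro p c _; simp
  | cons x xs ih =>
    intro p c h
    obtain ⟨hp, h2⟩ := List.pairwise_cons.mp h
    have hpx : p < x := hp x (by simp)
    have hxs : ∀ a ∈ xs, x < a := (List.pairwise_cons.mp h2).1
    have hcongr : xs.countP (fun y => !decide ((y - 1) ∈ x :: xs))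
        = xs.countP (fun y => !decide ((y - 1) ∈ p :: x :: xs)) := by
      apply List.countP_congr
      intro a ha
      have hxa : x < a := hxs a ha
      have hne : a - 1 ≠ p := by omega
      simp [List.mem_cons, hne]
    have hxhead : (x - 1 ∈ p :: x :: xs) ↔ x = p + 1 := by
      constructor
      · intro hmemh
        rcases List.mem_cons.mp hmemh with h1 | h1
        · omega
        · rcases List.mem_cons.mp h1 with h2' | h2'
          · omega
          · exact absurd (hxs _ h2') (by omega)
      · intro hx; simp [List.mem_cons]; omega
    by_cases hc : x = p + 1
    · have hstep : pvStep (c, some p) x = (c, some x) := by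
        subst hc; simp [pvStep]
      have hfalse : (!decide ((x - 1) ∈ p :: x :: xs)) = false := by
        simp [hc]
      rw [List.foldl_cons, hstep, ih x c h2, hcongr, List.countP_cons]
      simp only [hfalse, Bool.false_eq_true, if_false]
      push_cast
      ring
    · have hstep : pvStep (c, some p) x = (c + 1, some x) := by
        simp [pvStep, hc]
      have htrue : (!decide ((x - 1) ∈ p :: x :: xs)) = true := by
        simp [hxhead, hc]
      rw [List.foldl_cons, hstep, ih x (c + 1) h2, hcongr, List.countP_cons]
      simp only [htrue, if_true]
      push_cast
      ring

lemma pv_scan_none (l : List Int) (c : Int)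
    (h : l.Pairwise (· < ·)) :
    (l.foldl pvStep (c, none)).1
      = c + ((l.countP (fun x => !decide ((x - 1) ∈ l))) : Int) := by
  cases l with
  | nil => simp
  | cons x xs =>
    have hxs : ∀ a ∈ xs, x < a := (List.pairwise_cons.mp h).1
    have hstep : pvStep (c, none) x = (c + 1, some x) := by simp [pvStep]
    have htrue : (!decide ((x - 1) ∈ x :: xs)) = true := by
      simp only [List.mem_cons, Bool.not_eq_true', decide_eq_false_iff_not]
      rintro (h1 | h1)
      · omega
      · exact absurd (hxs _ h1) (by omega)
    rw [List.foldl_cons, hstep, pv_scan_some xs x (c + 1) h, List.countP_cons]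
    simp only [htrue, if_true]
    push_cast
    ring

lemma pv_border (s : List Int) (c : Int) (hs : s.Nodup) :
    ((PySem.List.sorted s (fun x => x) false).foldl pvStep (c, none)).1
      = c + ((s.countP (fun x => !decide ((x - 1) ∈ s))) : Int) := by
  have hperm : (PySem.List.sorted s (fun x => x) false).Perm s := PySem.List.sorted_perm s _ _
  have hle : (PySem.List.sorted s (fun x => x) false).Pairwise (fun a b => a ≤ b) :=
    PySem.List.sorted_pairwise s (fun x => x)
  have hnd : (PySem.List.sorted s (fun x => x) false).Nodup := hperm.nodup_iff.mpr hs
  have hlt : (PySem.List.sorted s (fun x => x) false).Pairwise (· < ·) :=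
    (hle.and hnd).imp (fun hab => lt_of_le_of_ne hab.1 hab.2)
  rw [pv_scan_none _ _ hlt]
  congr 1
  have h1 : (PySem.List.sorted s (fun x => x) false).countP
        (fun x => !decide ((x - 1) ∈ PySem.List.sorted s (fun x => x) false))
      = (PySem.List.sorted s (fun x => x) false).countP
        (fun x => !decide ((x - 1) ∈ s)) := by
    apply List.countP_congr
    intro a _
    simp [hperm.mem_iff]
  rw [h1, hperm.countP_eq]

lemma pv_main (borders : List (Int × List Int)) : ∀ (c : Int),
    (∀ kv ∈ borders, kv.2.Nodup) →
    borders.foldl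
      (fun count kv =>
        ((PySem.List.sorted kv.2 (fun x => x) false).foldl pvStep (count, none)).1) c
    = borders.foldl
      (fun count kv =>
        count + ((kv.2.countP (fun x => !decide ((x - 1) ∈ kv.2))) : Int)) c := by
  induction borders with
  | nil => intro c _; rfl
  | cons kv rest ih =>
    intro c hpre
    rw [List.foldl_cons, List.foldl_cons,
      pv_border kv.2 c (hpre kv (by simp))]
    exact ih _ (fun x hx => hpre x (List.mem_cons_of_mem _ hx))

-- ===== VERDICT (by name: the statement is the Claim_ definition above) =====
theorem get_sides_count_spec : Claim_equal_get_sides_count := by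
  intro borders _ hpre
  unfold Spec_get_sides_count get_sides_count get_sides_count_alt
  exact pv_main borders 0 hpre
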